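-- pv_equiv track=rewrite | github.com/hyuunnn/ida-break | code_break_ida.py | _rotate_items_from_anchor
-- ===== SOURCE A (Python) =====
-- def _rotate_items_from_anchor(items, anchor_idx, limit):
--     if not items:
--         return []
--     if anchor_idx < 0 or anchor_idx >= len(items):
--         anchor_idx = 0
--
--     out = []
--     n = len(items)
--     for i in range(min(limit, n)):
--         out.append(items[(anchor_idx + i) % n])
--     return out
-- ===== SOURCE B (Python) =====
-- def _rotate_items_from_anchor(items, anchor_idx, limit):
--     if not items:
--         return []
--     n = len(items)
--     if anchor_idx < 0 or anchor_idx >= n: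
--         anchor_idx = 0
--     rotated = list(items[anchor_idx:]) + list(items[:anchor_idx])
--     return rotated[:max(limit, 0)]
-- ===== Notes on version B (the rewrite author's own statement) =====
-- stated objective: simpler
-- what changed: Replaced the index-by-index loop with modular arithmetic by two slices concatenated (tail + head) and a single clamped prefix slice.
import Mathlib
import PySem

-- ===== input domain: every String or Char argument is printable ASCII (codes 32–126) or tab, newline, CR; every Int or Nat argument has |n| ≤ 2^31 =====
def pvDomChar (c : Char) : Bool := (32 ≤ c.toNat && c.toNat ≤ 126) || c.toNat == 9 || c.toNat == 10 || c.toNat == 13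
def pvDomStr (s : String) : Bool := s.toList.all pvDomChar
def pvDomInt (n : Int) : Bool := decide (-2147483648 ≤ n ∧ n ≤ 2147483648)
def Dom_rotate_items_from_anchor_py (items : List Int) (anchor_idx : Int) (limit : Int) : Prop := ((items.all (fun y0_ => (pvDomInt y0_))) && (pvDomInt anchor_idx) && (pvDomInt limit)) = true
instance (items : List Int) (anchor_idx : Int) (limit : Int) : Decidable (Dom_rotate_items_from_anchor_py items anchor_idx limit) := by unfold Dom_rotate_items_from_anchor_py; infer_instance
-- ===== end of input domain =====

-- B builds the rotation by two slices (tail ++ head) and one clamped prefix slice,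
-- instead of A's per-index modular-arithmetic loop (objective: simpler).

-- ===== PORT A =====
-- the index (anchor + i) % n is always in range (n > 0), so pyGetD with default 0 is exact
def rotate_items_from_anchor_py (items : List Int) (anchor_idx : Int) (limit : Int) : List Int :=
  if items = [] then []
  else
    let anchor := if anchor_idx < 0 ∨ anchor_idx ≥ (items.length : Int) then 0 else anchor_idx
    let n : Int := (items.length : Int)
    (PySem.List.pyRange 0 (min limit n) 1).foldl
      (fun out i => out ++ [PySem.List.pyGetD items (PySem.Int.mod (anchor + i) n) 0]) []

-- ===== PORT B =====
def rotate_items_from_anchor_py_alt (items : List Int) (anchor_idx : Int) (limit : Int) : List Int :=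
  if items = [] then []
  else
    let n : Int := (items.length : Int)
    let anchor := if anchor_idx < 0 ∨ anchor_idx ≥ n then 0 else anchor_idx
    let rotated := PySem.List.slice items (some anchor) none ++ PySem.List.slice items none (some anchor)
    PySem.List.slice rotated none (some (max limit 0))

-- ===== PRECONDITION & SPEC =====
def Spec_rotate_items_from_anchor_py (items : List Int) (anchor_idx : Int) (limit : Int) (out : List Int) : Prop := out = rotate_items_from_anchor_py_alt items anchor_idx limit
instance (items : List Int) (anchor_idx : Int) (limit : Int) (out : List Int) : Decidable (Spec_rotate_items_from_anchor_py items anchor_idx limit out) := by unfold Spec_rotate_items_from_anchor_py; infer_instance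

-- ===== CLAIM (what is proved, stated in full; the proofs are below) =====
def Claim_equal_rotate_items_from_anchor_py : Prop := ∀ (items : List Int) (anchor_idx : Int) (limit : Int), Dom_rotate_items_from_anchor_py items anchor_idx limit → Spec_rotate_items_from_anchor_py items anchor_idx limit (rotate_items_from_anchor_py items anchor_idx limit)

-- ===== LEMMAS AND PROOFS =====

-- element j of the rotation drop k ++ take k is element (k+j) % n of the original list
theorem rot_get? (xs : List Int) (k j : Nat) (hk : k < xs.length) (hj : j < xs.length) :
    (xs.drop k ++ xs.take k)[j]? = xs[(k + j) % xs.length]? := by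
  rcases lt_or_ge j (xs.length - k) with h | h
  · rw [List.getElem?_append_left (by simp; omega), List.getElem?_drop,
        Nat.mod_eq_of_lt (by omega)]
  · have hm : (k + j) % xs.length = k + j - xs.length := by
      rw [Nat.mod_eq_sub_mod (by omega), Nat.mod_eq_of_lt (by omega)]
    rw [List.getElem?_append_right (by simp; omega), hm,
        List.getElem?_take_of_lt (by simp; omega)]
    congr 1
    simp
    omega

theorem main_eq (items : List Int) (anchor_idx : Int) (limit : Int) :
    rotate_items_from_anchor_py items anchor_idx limit =
    rotate_items_from_anchor_py_alt items anchor_idx limit := by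
  unfold rotate_items_from_anchor_py rotate_items_from_anchor_py_alt
  by_cases hnil : items = []
  · simp [hnil]
  · simp only [if_neg hnil]
    set n := items.length with hn
    have hn0 : 0 < n := List.length_pos_iff.mpr hnil
    set anchor := if anchor_idx < 0 ∨ anchor_idx ≥ (n : Int) then 0 else anchor_idx with ha
    have hanchor : 0 ≤ anchor ∧ anchor < (n : Int) := by
      rw [ha]; split_ifs with h
      · exact ⟨le_refl 0, by exact_mod_cast hn0⟩
      · omega
    set k := anchor.toNat with hkdef
    have hkn : k < n := by omega
    have hanchor_cast : anchor = (k : Int) := by omega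
    -- A side: the append-singleton fold is a map over the range
    rw [PySem.List.foldl_append_singleton_eq_map, PySem.List.pyRange_one]
    -- B side: slices are drop / take
    rw [PySem.List.slice_from items hanchor.1, PySem.List.slice_to items hanchor.1]
    rw [PySem.List.slice_to _ (le_max_right limit 0)]
    apply List.ext_getElem
    · simp
      omega
    · intro j h1 h2
      have hjm : j < (min limit (n : Int) - 0).toNat := by
        simpa using h1
      have hjn : j < n := by omega
      have hlt : (k + j) % n < n := Nat.mod_lt _ (by omega)
      rw [← Option.some_inj, ← List.getElem?_eq_getElem, ← List.getElem?_eq_getElem]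
      rw [List.getElem?_take_of_lt (by simp at h2 ⊢; omega)]
      rw [← hkdef, rot_get? items k j hkn hjn]
      simp only [List.nil_append, List.getElem?_map, List.getElem?_range hjm,
                 Option.map_some]
      have hmod : PySem.Int.mod (anchor + (0 + (j : Int))) (n : Int) =
          (((k + j) % n : Nat) : Int) := by
        rw [hanchor_cast, zero_add]
        push_cast
        exact_mod_cast PySem.Int.mod_natCast (k + j) n
      rw [hmod, PySem.List.pyGetD_natCast, List.getD_eq_getElem items 0 hlt,
          List.getElem?_eq_getElem hlt]

-- ===== VERDICT (by name: the statement is the Claim_ definition above) =====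
theorem rotate_items_from_anchor_py_spec : Claim_equal_rotate_items_from_anchor_py := by
  intro items anchor_idx limit _
  exact main_eq items anchor_idx limit
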